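-- pv_equiv track=rewrite | github.com/StevedeRose/AdventOfCode | day_21.py | explore_tiles
-- ===== SOURCE A (Python) =====
-- from collections import defaultdict, deque
--
-- DIRECTIONS = [(0, -1), (1, 0), (0, 1), (-1, 0)]
--
-- def get_possible_neighbors(position, garden_map):
--     """
--     Retourne les voisins possibles d'une position dans la carte du jardin.
--     """
--     heigth, width = len(garden_map), len(garden_map[0])
--
--     return [(position[0] + dx, position[1] + dy) for dx, dy in DIRECTIONS
--             if garden_map[(position[0] + dx) % heigth][(position[1] + dy) % width] != '#']
--
-- def explore_tiles(position, garden_map, max_steps):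
--     """
--     Explore les tuiles du jardin à partir d'une position avec une limite de pas.
--     """
--     tiles = defaultdict(int)
--     visited = set()
--     queue = deque([(position, 0)])
--
--     while queue:
--         current_position, steps = queue.popleft()
--
--         if steps == (max_steps + 1) or current_position in visited:
--             continue
--
--         tiles[steps] += 1
--         visited.add(current_position)
--
--         for next_position in get_possible_neighbors(current_position, garden_map):
--             queue.append((next_position, (steps + 1)))
--
--     return tiles
-- ===== SOURCE B (Python) =====
-- from collections import defaultdict
--
-- DIRECTIONS = [(0, -1), (1, 0), (0, 1), (-1, 0)]
--
-- def get_possible_neighbors(position, garden_map):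
--     heigth, width = len(garden_map), len(garden_map[0])
--     return [(position[0] + dx, position[1] + dy) for dx, dy in DIRECTIONS
--             if garden_map[(position[0] + dx) % heigth][(position[1] + dy) % width] != '#']
--
-- def explore_tiles(position, garden_map, max_steps):
--     """Layer-synchronous BFS: one frontier set per step count."""
--     tiles = defaultdict(int)
--     if max_steps < 0:
--         return tiles
--     tiles[0] = 1
--     visited = {position}
--     frontier = {position}
--     for step in range(1, max_steps + 1):
--         next_frontier = set()
--         for cell in frontier:
--             for neighbor in get_possible_neighbors(cell, garden_map):
--                 if neighbor not in visited:
--                     next_frontier.add(neighbor)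
--         if not next_frontier:
--             break
--         tiles[step] = len(next_frontier)
--         visited |= next_frontier
--         frontier = next_frontier
--     return tiles
-- ===== Notes on version B (the rewrite author's own statement) =====
-- stated objective: alternative
-- what changed: Replaced A's single FIFO deque of (position, step)-tagged entries (with per-pop visited checks and a drained dummy layer at max_steps+1) by a layer-synchronous BFS that keeps one frontier set per step count, counts each new layer with len(), and stops as soon as a frontier is empty.
-- outside the precondition, e.g. on explore_tiles((0, 0), ['#'], -2): A returns {0: 1}, B returns {}; on explore_tiles((0, 0), ['...', '..'], 0): A returns {0: 1}, B returns {0: 1}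
import Mathlib
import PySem

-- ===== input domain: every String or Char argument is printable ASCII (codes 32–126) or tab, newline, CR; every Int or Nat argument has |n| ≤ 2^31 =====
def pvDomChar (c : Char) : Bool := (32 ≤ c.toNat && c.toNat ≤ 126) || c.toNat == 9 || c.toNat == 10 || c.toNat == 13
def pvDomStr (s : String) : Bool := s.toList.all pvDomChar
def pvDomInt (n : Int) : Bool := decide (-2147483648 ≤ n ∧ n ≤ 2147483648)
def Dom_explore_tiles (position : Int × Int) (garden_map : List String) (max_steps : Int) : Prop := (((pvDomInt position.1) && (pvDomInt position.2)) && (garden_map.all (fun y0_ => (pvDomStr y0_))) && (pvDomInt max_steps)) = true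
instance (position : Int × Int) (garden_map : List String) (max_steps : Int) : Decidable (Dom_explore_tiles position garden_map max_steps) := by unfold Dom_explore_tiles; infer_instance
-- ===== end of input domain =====

-- B replaces A's tagged FIFO-deque BFS by a layer-synchronous BFS over frontier sets (one set per
-- step count, no queue, no step tags); the equivalence below is about the returned dict only.

-- ===== PORT A =====
def pvDirections : List (Int × Int) := [(0, -1), (1, 0), (0, 1), (-1, 0)]

-- one direction of the comprehension in get_possible_neighbors; none = IndexError/ZeroDivisionError
def pvCheckDir (gm : List String) (h w : Int) (p : Int × Int) (acc : Option (List (Int × Int))) (d : Int × Int) : Option (List (Int × Int)) :=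
  match acc with
  | none => none
  | some l =>
    match PySem.Int.mod? (p.2 + d.2) w with
    | none => none
    | some col =>
      match PySem.List.pyGet? gm (PySem.Int.mod (p.1 + d.1) h) with
      | none => none
      | some row =>
        match PySem.Str.pyGet? row col with
        | none => none
        | some ch => some (if ch = '#' then l else l ++ [(p.1 + d.1, p.2 + d.2)])

-- get_possible_neighbors; none = the Python raises (empty map, empty first row, too-short row)
def get_possible_neighbors? (p : Int × Int) (gm : List String) : Option (List (Int × Int)) :=
  match PySem.List.pyGet? gm 0 with
  | none => none
  | some row0 => pvDirections.foldl (pvCheckDir gm (gm.length : Int) (PySem.Str.len row0) p) (some [])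

-- the while-queue loop of explore_tiles; fuel only makes it total (inside Pre_ it never runs out)
def exploreLoop (gm : List String) (M : Int) : Nat → List ((Int × Int) × Int) → PySem.Set (Int × Int) → PySem.Dict Int Int → PySem.Dict Int Int
  | _, [], _, tiles => tiles
  | 0, _ :: _, _, tiles => tiles
  | f + 1, (cur, steps) :: rest, visited, tiles =>
    if steps = M + 1 ∨ PySem.Set.contains visited cur = true then
      exploreLoop gm M f rest visited tiles
    else
      let tiles1 := tiles.modify steps 0 (· + 1)
      let visited1 := PySem.Set.add visited cur
      match get_possible_neighbors? cur gm with
      | none => tiles1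
      | some ns => exploreLoop gm M f (rest ++ ns.map (fun n => (n, steps + 1))) visited1 tiles1

def explore_tiles (position : Int × Int) (garden_map : List String) (max_steps : Int) : List (Int × Int) :=
  (exploreLoop garden_map max_steps (5 ^ (max_steps + 1).toNat) [(position, 0)] PySem.Set.empty PySem.Dict.empty).items

-- ===== PORT B =====
-- collect the unvisited wrapped neighbors of one frontier cell into the next-frontier set
def pvCollect (gm : List String) (visited : PySem.Set (Int × Int)) (acc : Option (PySem.Set (Int × Int))) (cell : Int × Int) : Option (PySem.Set (Int × Int)) :=
  match acc with
  | none => none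
  | some nf =>
    match get_possible_neighbors? cell gm with
    | none => none
    | some ns =>
      some (ns.foldl (fun nf n => if PySem.Set.contains visited n then nf else PySem.Set.add nf n) nf)

-- the 'for step in range(1, max_steps+1)' loop of B; step is the Int step counter
def exploreLayers (gm : List String) : Nat → PySem.Set (Int × Int) → PySem.Set (Int × Int) → PySem.Dict Int Int → Int → PySem.Dict Int Int
  | 0, _, _, tiles, _ => tiles
  | r + 1, frontier, visited, tiles, step =>
    match frontier.foldl (pvCollect gm visited) (some PySem.Set.empty) with
    | none => tiles
    | some nf =>
      if nf = [] then tiles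
      else exploreLayers gm r nf (PySem.Set.update visited nf) (tiles.insert step (nf.length : Int)) (step + 1)

def explore_tiles_alt (position : Int × Int) (garden_map : List String) (max_steps : Int) : List (Int × Int) :=
  if max_steps < 0 then (PySem.Dict.empty : PySem.Dict Int Int).items
  else (exploreLayers garden_map max_steps.toNat
        (PySem.Set.add PySem.Set.empty position) (PySem.Set.add PySem.Set.empty position)
        (PySem.Dict.insert PySem.Dict.empty 0 1) 1).items

-- ===== PRECONDITION & SPEC =====
-- Pre_ excludes (a) max_steps ≤ -2, where A's step counter can never hit max_steps+1 so A loops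
-- forever except in degenerate all-blocked cases, and (b) maps whose first row is empty or longer
-- than some other row, on which A raises IndexError/ZeroDivisionError except when the short row is
-- never probed.
def Pre_explore_tiles (position : Int × Int) (garden_map : List String) (max_steps : Int) : Prop :=
  -1 ≤ max_steps ∧ (0 ≤ max_steps →
    garden_map ≠ [] ∧ 0 < garden_map.headI.toList.length ∧
    ∀ s ∈ garden_map, garden_map.headI.toList.length ≤ s.toList.length)
instance (position : Int × Int) (garden_map : List String) (max_steps : Int) : Decidable (Pre_explore_tiles position garden_map max_steps) := by unfold Pre_explore_tiles; infer_instance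

def pvWitness_explore_tiles : (Int × Int) × List String × Int := ((0, 0), [".#", ".."], 2)

def Spec_explore_tiles (position : Int × Int) (garden_map : List String) (max_steps : Int) (out : List (Int × Int)) : Prop := out = explore_tiles_alt position garden_map max_steps
instance (position : Int × Int) (garden_map : List String) (max_steps : Int) (out : List (Int × Int)) : Decidable (Spec_explore_tiles position garden_map max_steps out) := by unfold Spec_explore_tiles; infer_instance

-- ===== CLAIM (what is proved, stated in full; the proofs are below) =====
def Claim_equal_explore_tiles : Prop := ∀ (position : Int × Int) (garden_map : List String) (max_steps : Int), Dom_explore_tiles position garden_map max_steps → Pre_explore_tiles position garden_map max_steps → Spec_explore_tiles position garden_map max_steps (explore_tiles position garden_map max_steps)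

-- ===== LEMMAS AND PROOFS =====

-- total neighbor function used by the proofs (inside Pre_, get_possible_neighbors? is `some (pvN …)`)
def pvN (gm : List String) (c : Int × Int) : List (Int × Int) := (get_possible_neighbors? c gm).getD []

-- the cells of a layer list that A actually visits: unvisited, first occurrences, in order
def dedupUnv : List (Int × Int) → List (Int × Int) → List (Int × Int)
  | _, [] => []
  | v, c :: cs => if c ∈ v then dedupUnv v cs else c :: dedupUnv (v ++ [c]) cs

-- n applications of `tiles[s] += 1`
def tmod (t : PySem.Dict Int Int) (s : Int) : Nat → PySem.Dict Int Int
  | 0 => t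
  | n + 1 => (tmod t s n).modify s 0 (· + 1)

theorem exploreLoop_nil (gm : List String) (M : Int) (f : Nat) (v : PySem.Set (Int × Int)) (t : PySem.Dict Int Int) :
    exploreLoop gm M f [] v t = t := by cases f <;> rfl

theorem exploreLoop_skip (gm : List String) (M : Int) (f : Nat) (cur : Int × Int) (steps : Int)
    (rest : List ((Int × Int) × Int)) (v : PySem.Set (Int × Int)) (t : PySem.Dict Int Int)
    (h : steps = M + 1 ∨ PySem.Set.contains v cur = true) :
    exploreLoop gm M (f + 1) ((cur, steps) :: rest) v t = exploreLoop gm M f rest v t := by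
  simp only [exploreLoop, if_pos h]

theorem exploreLoop_visit (gm : List String) (M : Int) (f : Nat) (cur : Int × Int) (steps : Int)
    (rest : List ((Int × Int) × Int)) (v : PySem.Set (Int × Int)) (t : PySem.Dict Int Int)
    (h : ¬(steps = M + 1 ∨ PySem.Set.contains v cur = true))
    (ns : List (Int × Int)) (hns : get_possible_neighbors? cur gm = some ns) :
    exploreLoop gm M (f + 1) ((cur, steps) :: rest) v t =
      exploreLoop gm M f (rest ++ ns.map (fun n => (n, steps + 1))) (PySem.Set.add v cur) (t.modify steps 0 (· + 1)) := by
  simp only [exploreLoop, if_neg h, hns]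

theorem mem_dedupUnv (x : Int × Int) : ∀ (L v : List (Int × Int)), x ∈ dedupUnv v L ↔ x ∈ L ∧ x ∉ v := by
  intro L
  induction L with
  | nil => intro v; simp [dedupUnv]
  | cons c cs ih =>
    intro v
    by_cases hc : c ∈ v
    · simp only [dedupUnv, if_pos hc, ih]
      constructor
      · rintro ⟨h1, h2⟩; exact ⟨List.mem_cons_of_mem _ h1, h2⟩
      · rintro ⟨h1, h2⟩
        rcases List.mem_cons.mp h1 with rfl | h1
        · exact absurd hc h2
        · exact ⟨h1, h2⟩
    · simp only [dedupUnv, if_neg hc, List.mem_cons, ih, List.mem_append]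
      constructor
      · rintro (rfl | ⟨h1, h2⟩)
        · exact ⟨Or.inl rfl, hc⟩
        · exact ⟨Or.inr h1, fun hv => h2 (Or.inl hv)⟩
      · rintro ⟨rfl | h1, h2⟩
        · exact Or.inl rfl
        · by_cases hxc : x = c
          · exact Or.inl hxc
          · exact Or.inr ⟨h1, by simp [h2, hxc]⟩

theorem nodup_dedupUnv : ∀ (L v : List (Int × Int)), (dedupUnv v L).Nodup := by
  intro L
  induction L with
  | nil => intro v; simp [dedupUnv]
  | cons c cs ih =>
    intro v
    by_cases hc : c ∈ v
    · simpa [dedupUnv, if_pos hc] using ih v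
    · rw [dedupUnv, if_neg hc]
      refine List.nodup_cons.mpr ⟨fun hmem => ?_, ih (v ++ [c])⟩
      have := (mem_dedupUnv c cs (v ++ [c])).mp hmem
      simp at this

theorem length_dedupUnv_le : ∀ (L v : List (Int × Int)), (dedupUnv v L).length ≤ L.length := by
  intro L
  induction L with
  | nil => intro v; simp [dedupUnv]
  | cons c cs ih =>
    intro v
    by_cases hc : c ∈ v
    · simp only [dedupUnv, if_pos hc]; exact (ih v).trans (by simp)
    · simpa [dedupUnv, if_neg hc, Nat.succ_le_succ_iff] using ih (v ++ [c])

theorem tmod_left (t : PySem.Dict Int Int) (s : Int) : ∀ n, tmod (t.modify s 0 (· + 1)) s n = tmod t s (n + 1) := by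
  intro n
  induction n with
  | zero => rfl
  | succ n ih => simp only [tmod, ih]

theorem dict_mem_items_key_ne (t : PySem.Dict Int Int) (s : Int) (h : t.contains s = false) :
    ∀ p ∈ t.items, p.1 ≠ s := by
  intro p hp hps
  have : s ∈ t.keys := by
    simp only [PySem.Dict.keys]
    exact List.mem_map.mpr ⟨p, hp, hps⟩
  rw [← PySem.Dict.contains_iff_mem_keys] at this
  simp [h] at this

theorem insert_insert_same (t : PySem.Dict Int Int) (s a b : Int) (h : t.contains s = false) :
    (t.insert s a).insert s b = t.insert s b := by
  apply PySem.Dict.ext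
  have h1 : (t.insert s a).contains s = true := by simp
  rw [PySem.Dict.items_insert_of_contains _ _ h1, PySem.Dict.items_insert_of_not_contains _ _ h,
      PySem.Dict.items_insert_of_not_contains _ _ h, List.map_append]
  have hmap : List.map (fun p => if (p.1 == s) = true then (s, b) else p) t.items = t.items := by
    conv_rhs => rw [← List.map_id t.items]
    apply List.map_congr_left
    intro p hp
    have := dict_mem_items_key_ne t s h p hp
    simp [this]
  rw [hmap]
  simp

theorem tmod_insert (t : PySem.Dict Int Int) (s : Int) (h : t.contains s = false) :
    ∀ n : Nat, tmod t s (n + 1) = t.insert s ((n : Int) + 1) := by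
  intro n
  induction n with
  | zero =>
    show (tmod t s 0).modify s 0 (· + 1) = t.insert s 1
    simp only [tmod, PySem.Dict.modify, PySem.Dict.getD_of_not_contains t 0 h]
    norm_num
  | succ n ih =>
    show (tmod t s (n + 1)).modify s 0 (· + 1) = _
    rw [ih]
    simp only [PySem.Dict.modify, PySem.Dict.getD_insert_self]
    rw [insert_insert_same t s _ _ h]
    congr 1
    try push_cast
    try ring

-- one step of the neighbor comprehension succeeds and adds at most one cell
theorem pvCheckDir_some (gm : List String) (w : Int) (p d : Int × Int) (l : List (Int × Int))
    (hgm : gm ≠ []) (hw : 0 < w) (hrows : ∀ s ∈ gm, w ≤ (s.toList.length : Int)) :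
    ∃ l1, pvCheckDir gm (gm.length : Int) w p (some l) d = some l1 ∧ l1.length ≤ l.length + 1 := by
  have hh : (0 : Int) < (gm.length : Int) := by
    have := List.length_pos_iff.mpr hgm
    exact_mod_cast this
  have hcol : PySem.Int.mod? (p.2 + d.2) w = some (PySem.Int.mod (p.2 + d.2) w) := by
    simp [PySem.Int.mod?, PySem.Int.mod, hw.ne']
  have hr0 : 0 ≤ PySem.Int.mod (p.1 + d.1) (gm.length : Int) := PySem.Int.mod_nonneg _ hh
  have hr1 : PySem.Int.mod (p.1 + d.1) (gm.length : Int) < (gm.length : Int) := PySem.Int.mod_lt _ hh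
  have hrow : PySem.List.pyGet? gm (PySem.Int.mod (p.1 + d.1) (gm.length : Int)) =
      some (gm[(PySem.Int.mod (p.1 + d.1) (gm.length : Int)).toNat]'(by omega)) := by
    rw [PySem.List.pyGet?_of_nonneg _ hr0]
    exact List.getElem?_eq_getElem (by omega)
  set row := gm[(PySem.Int.mod (p.1 + d.1) (gm.length : Int)).toNat]'(by omega) with hrowdef
  have hrowmem : row ∈ gm := List.getElem_mem _
  have hwrow : w ≤ (row.toList.length : Int) := hrows row hrowmem
  have hc0 : 0 ≤ PySem.Int.mod (p.2 + d.2) w := PySem.Int.mod_nonneg _ hw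
  have hc1 : PySem.Int.mod (p.2 + d.2) w < w := PySem.Int.mod_lt _ hw
  have hch : PySem.Str.pyGet? row (PySem.Int.mod (p.2 + d.2) w) =
      some (row.toList[(PySem.Int.mod (p.2 + d.2) w).toNat]'(by omega)) := by
    show PySem.Chars.pyGet? row.toList _ = _
    show PySem.List.pyGet? row.toList _ = _
    rw [PySem.List.pyGet?_of_nonneg _ hc0]
    exact List.getElem?_eq_getElem (by omega)
  refine ⟨if row.toList[(PySem.Int.mod (p.2 + d.2) w).toNat]'(by omega) = '#' then l
          else l ++ [(p.1 + d.1, p.2 + d.2)], ?_, ?_⟩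
  · simp only [pvCheckDir, hcol, hrow, hch]
  · split <;> simp

theorem pvCheckDir_fold_some (gm : List String) (w : Int) (p : Int × Int)
    (hgm : gm ≠ []) (hw : 0 < w) (hrows : ∀ s ∈ gm, w ≤ (s.toList.length : Int)) :
    ∀ (dirs : List (Int × Int)) (l : List (Int × Int)),
      ∃ l', dirs.foldl (pvCheckDir gm (gm.length : Int) w p) (some l) = some l' ∧
        l'.length ≤ l.length + dirs.length := by
  intro dirs
  induction dirs with
  | nil => intro l; exact ⟨l, rfl, by simp⟩
  | cons d ds ih =>
    intro l
    obtain ⟨l1, h1, h1len⟩ := pvCheckDir_some gm w p d l hgm hw hrows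
    obtain ⟨l', h', hlen⟩ := ih l1
    exact ⟨l', by simpa [h1] using h', by simp only [List.length_cons]; omega⟩

theorem gpn_some (gm : List String) (hgm : gm ≠ []) (hw : 0 < gm.headI.toList.length)
    (hrows : ∀ s ∈ gm, gm.headI.toList.length ≤ s.toList.length) (c : Int × Int) :
    get_possible_neighbors? c gm = some (pvN gm c) ∧ (pvN gm c).length ≤ 4 := by
  obtain ⟨g0, gr, rfl⟩ : ∃ g0 gr, gm = g0 :: gr := by
    cases gm with
    | nil => exact absurd rfl hgm
    | cons a b => exact ⟨a, b, rfl⟩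
  have hw' : (0 : Int) < PySem.Str.len g0 := by rw [PySem.Str.len_eq]; exact_mod_cast hw
  have hrows' : ∀ s ∈ g0 :: gr, PySem.Str.len g0 ≤ (s.toList.length : Int) := by
    intro s hs
    rw [PySem.Str.len_eq]
    exact_mod_cast hrows s hs
  obtain ⟨l', hfold, hlen⟩ :=
    pvCheckDir_fold_some (g0 :: gr) (PySem.Str.len g0) c hgm hw' hrows' pvDirections []
  have : get_possible_neighbors? c (g0 :: gr) = some l' := by
    simp only [get_possible_neighbors?, PySem.List.pyGet?_zero_cons]
    exact hfold
  refine ⟨by rw [this]; simp [pvN, this], ?_⟩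
  simp only [pvN, this, Option.getD_some]
  simpa [pvDirections] using hlen

theorem flat_len (gm : List String) (hN4 : ∀ c, (pvN gm c).length ≤ 4) :
    ∀ l : List (Int × Int), (l.flatMap (pvN gm)).length ≤ 4 * l.length := by
  intro l
  induction l with
  | nil => simp
  | cons c cs ih =>
    simp only [List.flatMap_cons, List.length_append, List.length_cons]
    have := hN4 c
    omega

-- membership / nodup of the inner 'add unvisited neighbors' fold of B
theorem mem_addUnv (v : PySem.Set (Int × Int)) :
    ∀ (ns : List (Int × Int)) (nf : PySem.Set (Int × Int)) (x : Int × Int),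
      x ∈ ns.foldl (fun nf n => if PySem.Set.contains v n then nf else PySem.Set.add nf n) nf ↔
        x ∈ nf ∨ (x ∈ ns ∧ x ∉ v) := by
  intro ns
  induction ns with
  | nil => intro nf x; simp
  | cons n ns ih =>
    intro nf x
    simp only [List.foldl_cons, ih, List.mem_cons]
    by_cases hv : PySem.Set.contains v n = true
    · have hnv : n ∈ v := (PySem.Set.contains_iff v n).mp hv
      rw [if_pos hv]
      constructor
      · rintro (h | h)
        · exact Or.inl h
        · exact Or.inr ⟨Or.inr h.1, h.2⟩
      · rintro (h | ⟨rfl | h1, h2⟩)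
        · exact Or.inl h
        · exact absurd hnv h2
        · exact Or.inr ⟨h1, h2⟩
    · have hnv : n ∉ v := fun h => hv ((PySem.Set.contains_iff v n).mpr h)
      rw [if_neg hv]
      simp only [PySem.Set.mem_add]
      constructor
      · rintro ((h | rfl) | h)
        · exact Or.inl h
        · exact Or.inr ⟨Or.inl rfl, hnv⟩
        · exact Or.inr ⟨Or.inr h.1, h.2⟩
      · rintro (h | ⟨rfl | h1, h2⟩)
        · exact Or.inl (Or.inl h)
        · exact Or.inl (Or.inr rfl)
        · exact Or.inr ⟨h1, h2⟩

theorem nodup_addUnv (v : PySem.Set (Int × Int)) :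
    ∀ (ns : List (Int × Int)) (nf : PySem.Set (Int × Int)), nf.Nodup →
      (ns.foldl (fun nf n => if PySem.Set.contains v n then nf else PySem.Set.add nf n) nf).Nodup := by
  intro ns
  induction ns with
  | nil => intro nf h; exact h
  | cons n ns ih =>
    intro nf h
    simp only [List.foldl_cons]
    apply ih
    split
    · exact h
    · exact PySem.Set.nodup_add nf n h

-- the outer fold of B over the frontier, under a never-raising neighbor map
theorem collect_mem (gm : List String) (v : PySem.Set (Int × Int))
    (hN : ∀ c, get_possible_neighbors? c gm = some (pvN gm c)) :
    ∀ (G : List (Int × Int)) (nf0 : PySem.Set (Int × Int)),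
      ∃ nf, G.foldl (pvCollect gm v) (some nf0) = some nf ∧
        (∀ x, x ∈ nf ↔ x ∈ nf0 ∨ ∃ c ∈ G, x ∈ pvN gm c ∧ x ∉ v) ∧
        (nf0.Nodup → nf.Nodup) := by
  intro G
  induction G with
  | nil =>
    intro nf0
    exact ⟨nf0, rfl, by simp, id⟩
  | cons c G ih =>
    intro nf0
    obtain ⟨nf, hnf, hmem, hnd⟩ :=
      ih (List.foldl (fun nf n => if PySem.Set.contains v n then nf else PySem.Set.add nf n) nf0 (pvN gm c))
    refine ⟨nf, ?_, ?_, ?_⟩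
    · simpa [pvCollect, hN c] using hnf
    · intro x
      rw [hmem x, mem_addUnv v (pvN gm c) nf0 x]
      constructor
      · rintro ((h | h) | ⟨c', hc', h⟩)
        · exact Or.inl h
        · exact Or.inr ⟨c, List.mem_cons_self, h⟩
        · exact Or.inr ⟨c', List.mem_cons_of_mem _ hc', h⟩
      · rintro (h | ⟨c', hc', h⟩)
        · exact Or.inl (Or.inl h)
        · rcases List.mem_cons.mp hc' with rfl | hc'
          · exact Or.inl (Or.inr h)
          · exact Or.inr ⟨c', hc', h⟩
    · intro h0
      exact hnd (nodup_addUnv v (pvN gm c) nf0 h0)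

-- A's queue drains entries tagged max_steps+1 without touching the state
theorem drain (gm : List String) (M : Int) :
    ∀ (L : List (Int × Int)) (f : Nat) (v : PySem.Set (Int × Int)) (t : PySem.Dict Int Int),
      L.length ≤ f → exploreLoop gm M f (L.map (fun c => (c, M + 1))) v t = t := by
  intro L
  induction L with
  | nil => intro f v t _; exact exploreLoop_nil gm M f v t
  | cons c cs ih =>
    intro f v t hf
    obtain ⟨f', rfl⟩ : ∃ f', f = f' + 1 := ⟨f - 1, by simp at hf; omega⟩
    rw [List.map_cons, exploreLoop_skip gm M f' c (M + 1) _ v t (Or.inl rfl)]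
    exact ih f' v t (by simp at hf; omega)

-- A processes one whole layer: inner induction along the layer list
theorem layer (gm : List String) (M : Int)
    (hN : ∀ c, get_possible_neighbors? c gm = some (pvN gm c))
    (hN4 : ∀ c, (pvN gm c).length ≤ 4)
    (s : Int) (k : Nat) (hs : M + 1 - s = ((k : Int) + 1)) :
    ∀ (L acc v : List (Int × Int)) (t : PySem.Dict Int Int) (f : Nat),
      L.length * 5 ^ (k + 1) + acc.length * 5 ^ k ≤ f →
      exploreLoop gm M f (L.map (fun c => (c, s)) ++ acc.map (fun c => (c, s + 1))) v t =
        exploreLoop gm M (f - L.length)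
          ((acc ++ (dedupUnv v L).flatMap (pvN gm)).map (fun c => (c, s + 1)))
          (v ++ dedupUnv v L) (tmod t s (dedupUnv v L).length) := by
  have hsM : s ≠ M + 1 := by omega
  intro L
  induction L with
  | nil =>
    intro acc v t f _
    simp [dedupUnv, tmod]
  | cons c cs ih =>
    intro acc v t f hf
    have h5k : 1 ≤ 5 ^ k := Nat.one_le_pow _ _ (by norm_num)
    have h5k1 : 5 ^ (k + 1) = 5 ^ k * 5 := pow_succ 5 k
    have h5k1' : 1 ≤ 5 ^ (k + 1) := Nat.one_le_pow _ _ (by norm_num)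
    have hexp : (c :: cs).length * 5 ^ (k + 1) = cs.length * 5 ^ (k + 1) + 5 ^ (k + 1) := by
      simp [List.length_cons, add_mul]
    have hf1 : 1 ≤ f := by rw [hexp] at hf; omega
    obtain ⟨f', rfl⟩ : ∃ f', f = f' + 1 := ⟨f - 1, by omega⟩
    rw [List.map_cons, List.cons_append]
    by_cases hc : c ∈ v
    · have hcv : PySem.Set.contains v c = true := (PySem.Set.contains_iff v c).mpr hc
      rw [exploreLoop_skip gm M f' c s _ v t (Or.inr hcv)]
      have hf' : cs.length * 5 ^ (k + 1) + acc.length * 5 ^ k ≤ f' := by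
        rw [hexp] at hf; omega
      rw [ih acc v t f' hf']
      have : dedupUnv v (c :: cs) = dedupUnv v cs := by simp [dedupUnv, hc]
      rw [this]
      congr 1
      simp only [List.length_cons]
      omega
    · have hcv : ¬(s = M + 1 ∨ PySem.Set.contains v c = true) := by
        push_neg
        exact ⟨hsM, by simp [hc]⟩
      rw [exploreLoop_visit gm M f' c s _ v t hcv (pvN gm c) (hN c)]
      rw [List.append_assoc, ← List.map_append]
      have hadd : PySem.Set.add v c = v ++ [c] := PySem.Set.add_of_not_mem hc
      rw [hadd]
      have hf' : cs.length * 5 ^ (k + 1) + (acc ++ pvN gm c).length * 5 ^ k ≤ f' := by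
        rw [hexp] at hf
        simp only [List.length_append]
        have hnq : (pvN gm c).length * 5 ^ k ≤ 4 * 5 ^ k := Nat.mul_le_mul_right _ (hN4 c)
        have hexp2 : (acc.length + (pvN gm c).length) * 5 ^ k
            = acc.length * 5 ^ k + (pvN gm c).length * 5 ^ k := by ring
        rw [hexp2, h5k1] at *
        omega
      rw [ih (acc ++ pvN gm c) (v ++ [c]) (t.modify s 0 (· + 1)) f' hf']
      have hD : dedupUnv v (c :: cs) = c :: dedupUnv (v ++ [c]) cs := by simp [dedupUnv, hc]
      rw [hD, tmod_left]
      simp only [List.flatMap_cons, List.append_assoc, List.singleton_append,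
        List.length_cons, Nat.succ_sub_succ]

-- the bridge: A's queue loop from the start of a layer equals B's layered loop
theorem bridge (gm : List String) (M : Int)
    (hN : ∀ c, get_possible_neighbors? c gm = some (pvN gm c))
    (hN4 : ∀ c, (pvN gm c).length ≤ 4) :
    ∀ (r : Nat), (r : Int) ≤ M →
    ∀ (L G v_A v_B : List (Int × Int)) (t : PySem.Dict Int Int) (f : Nat),
      (∀ x, x ∈ v_A ↔ x ∈ v_B) →
      (∀ x, x ∉ v_A → (x ∈ L ↔ ∃ c ∈ G, x ∈ pvN gm c)) →
      (∀ kk ∈ t.keys, kk < M + 1 - r) →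
      L.length * 5 ^ r ≤ f →
      exploreLoop gm M f (L.map (fun c => (c, M + 1 - r))) v_A t =
        exploreLayers gm r G v_B t (M + 1 - r) := by
  intro r
  induction r with
  | zero =>
    intro _ L G v_A v_B t f _ _ _ hf
    show exploreLoop gm M f (L.map (fun c => (c, M + 1 - 0))) v_A t = t
    have : M + 1 - (0 : Int) = M + 1 := by omega
    rw [this]
    exact drain gm M L f v_A t (by simpa using hf)
  | succ r ih =>
    intro hr L G v_A v_B t f hv hL ht hf
    set s : Int := M + 1 - (r + 1 : Nat) with hsdef
    have hs : M + 1 - s = (r : Int) + 1 := by rw [hsdef]; push_cast; ring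
    have hlayer := layer gm M hN hN4 s r hs L [] v_A t f (by simpa using hf)
    simp only [List.map_nil, List.append_nil, List.nil_append] at hlayer
    rw [hlayer]
    obtain ⟨nf, hnf, hmem, hnd⟩ := collect_mem gm v_B hN G PySem.Set.empty
    have hnfnd : nf.Nodup := hnd (by simp [PySem.Set.empty])
    set D := dedupUnv v_A L with hDdef
    have hDnf : ∀ x, x ∈ D ↔ x ∈ nf := by
      intro x
      rw [hDdef, mem_dedupUnv, hmem]
      simp only [PySem.Set.empty]
      constructor
      · rintro ⟨h1, h2⟩
        obtain ⟨c, hc, hx⟩ := (hL x h2).mp h1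
        exact Or.inr ⟨c, hc, hx, fun hb => h2 ((hv x).mpr hb)⟩
      · rintro (h | ⟨c, hc, hx, hb⟩)
        · simp at h
        · have h2 : x ∉ v_A := fun ha => hb ((hv x).mp ha)
          exact ⟨(hL x h2).mpr ⟨c, hc, hx⟩, h2⟩
    show _ = exploreLayers gm (r + 1) G v_B t s
    simp only [exploreLayers, hnf]
    by_cases hempty : nf = []
    · subst hempty
      have hDnil : D = [] := List.eq_nil_iff_forall_not_mem.mpr (by
        intro a ha
        exact (by simpa using (hDnf a).mp ha))
      rw [if_pos rfl, hDnil]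
      simp [tmod, exploreLoop_nil]
    · rw [if_neg hempty]
      have hDne : D ≠ [] := by
        obtain ⟨x, hx⟩ := List.exists_mem_of_ne_nil nf hempty
        intro hD
        exact absurd ((hDnf x).mpr hx) (by simp [hD])
      have hconts : t.contains s = false := by
        by_contra hcs
        have : s ∈ t.keys := (PySem.Dict.contains_iff_mem_keys t s).mp (by simpa using hcs)
        have := ht s this
        omega
      have hlen : D.length = nf.length :=
        (((List.perm_ext_iff_of_nodup (nodup_dedupUnv L v_A) hnfnd).mpr hDnf)).length_eq
      obtain ⟨m, hm⟩ : ∃ m, D.length = m + 1 := by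
        cases hD : D with
        | nil => exact absurd hD hDne
        | cons a b => exact ⟨b.length, by simp⟩
      have htm : tmod t s D.length = t.insert s ((D.length : Int)) := by
        rw [hm, tmod_insert t s hconts m]
        congr 1
        try push_cast
        try ring
      rw [htm, hlen]
      have hs1 : s + 1 = M + 1 - (r : Int) := by rw [hsdef]; push_cast; ring
      rw [hs1]
      apply ih (by push_cast at hr ⊢; omega)
      · intro x
        simp only [List.mem_append, PySem.Set.mem_update]
        rw [hDnf x]  -- careful: need component-wise
        constructor
        · rintro (h | h)
          · exact Or.inl ((hv x).mp h)
          · exact Or.inr h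
        · rintro (h | h)
          · exact Or.inl ((hv x).mpr h)
          · exact Or.inr h
      · intro x _
        rw [List.mem_flatMap]
        constructor
        · rintro ⟨c, hc, hx⟩
          exact ⟨c, (hDnf c).mp hc, hx⟩
        · rintro ⟨c, hc, hx⟩
          exact ⟨c, (hDnf c).mpr hc, hx⟩
      · intro kk hkk
        rw [PySem.Dict.keys_insert_of_not_contains t _ hconts, List.mem_append] at hkk
        rcases hkk with h | h
        · have := ht kk h
          push_cast at this ⊢
          omega
        · simp at h
          subst h
          simp [hsdef]
          try push_cast
          try omega
      · have hflat := flat_len gm hN4 D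
        have hDL := length_dedupUnv_le L v_A
        rw [← hDdef] at hDL
        have h5 : 1 ≤ 5 ^ r := Nat.one_le_pow _ _ (by norm_num)
        have h5' : 5 ^ (r + 1) = 5 * 5 ^ r := by rw [pow_succ]; ring
        have hLf : L.length ≤ f := by nlinarith [hf]
        rw [Nat.le_sub_iff_add_le hLf]
        calc (D.flatMap (pvN gm)).length * 5 ^ r + L.length
            ≤ 4 * D.length * 5 ^ r + L.length := by
              have := Nat.mul_le_mul_right (5 ^ r) hflat
              omega
          _ ≤ 4 * L.length * 5 ^ r + L.length * 5 ^ r := by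
              have h1 : 4 * D.length * 5 ^ r ≤ 4 * L.length * 5 ^ r :=
                Nat.mul_le_mul_right _ (by omega)
              have h2 : L.length ≤ L.length * 5 ^ r := Nat.le_mul_of_pos_right _ (by omega)
              omega
          _ = L.length * 5 ^ (r + 1) := by rw [h5']; ring
          _ ≤ f := hf

-- ===== VERDICT (by name: the statement is the Claim_ definition above) =====
theorem explore_tiles_spec : Claim_equal_explore_tiles := by
  intro position garden_map max_steps _ hPre
  unfold Spec_explore_tiles
  obtain ⟨hM1, hPre0⟩ := hPre
  by_cases hMneg : max_steps < 0
  · have hM : max_steps = -1 := by omega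
    subst hM
    show (exploreLoop garden_map (-1) (5 ^ ((-1 : Int) + 1).toNat) [(position, 0)] PySem.Set.empty PySem.Dict.empty).items = _
    norm_num
    rw [show (1 : Nat) = 0 + 1 from rfl]
    rw [exploreLoop_skip _ _ _ _ _ _ _ _ (Or.inl (by norm_num))]
    rw [exploreLoop_nil]
    simp [explore_tiles_alt]
  · push_neg at hMneg
    obtain ⟨hgm, hw, hrows⟩ := hPre0 hMneg
    have hN : ∀ c, get_possible_neighbors? c garden_map = some (pvN garden_map c) :=
      fun c => (gpn_some garden_map hgm hw hrows c).1
    have hN4 : ∀ c, (pvN garden_map c).length ≤ 4 :=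
      fun c => (gpn_some garden_map hgm hw hrows c).2
    have hktn : (max_steps + 1).toNat = max_steps.toNat + 1 := by omega
    obtain ⟨f', hf'⟩ : ∃ f', 5 ^ (max_steps + 1).toNat = f' + 1 := by
      rw [hktn]
      have : 1 ≤ 5 ^ (max_steps.toNat + 1) := Nat.one_le_pow _ _ (by norm_num)
      exact ⟨5 ^ (max_steps.toNat + 1) - 1, by omega⟩
    show (exploreLoop garden_map max_steps (5 ^ (max_steps + 1).toNat) [(position, 0)] PySem.Set.empty PySem.Dict.empty).items = _
    rw [hf']
    have hcond : ¬((0 : Int) = max_steps + 1 ∨ PySem.Set.contains PySem.Set.empty position = true) := by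
      push_neg
      constructor
      · omega
      · simp [PySem.Set.contains_eq_listContains, PySem.Set.empty]
    rw [exploreLoop_visit _ _ _ _ _ _ _ _ hcond (pvN garden_map position) (hN position)]
    have hv1 : PySem.Set.add (PySem.Set.empty) position = [position] := by
      rw [PySem.Set.add_of_not_mem (by simp [PySem.Set.empty])]
      rfl
    have ht1 : (PySem.Dict.empty : PySem.Dict Int Int).modify 0 0 (· + 1) = PySem.Dict.insert PySem.Dict.empty 0 1 := by
      simp only [PySem.Dict.modify, PySem.Dict.getD_empty]
      norm_num
    rw [hv1, ht1]
    have h1 : max_steps + 1 - (max_steps.toNat : Int) = 1 := by omega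
    have hb := bridge garden_map max_steps hN hN4 max_steps.toNat (by omega)
      (pvN garden_map position) [position] [position] [position]
      (PySem.Dict.insert PySem.Dict.empty 0 1) f'
      (fun x => Iff.rfl)
      (by
        intro x _
        constructor
        · intro h
          exact ⟨position, by simp, h⟩
        · rintro ⟨c, hc, h⟩
          simp at hc
          subst hc
          exact h)
      (by
        intro kk hkk
        rw [PySem.Dict.keys_insert_of_not_contains _ _ (PySem.Dict.contains_empty 0),
          PySem.Dict.keys_empty, List.nil_append] at hkk
        simp at hkk
        subst hkk
        omega)
      (by
        have hn : (pvN garden_map position).length * 5 ^ max_steps.toNat ≤ 4 * 5 ^ max_steps.toNat :=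
          Nat.mul_le_mul_right _ (hN4 position)
        have h5 : 5 ^ (max_steps.toNat + 1) = 5 * 5 ^ max_steps.toNat := by rw [pow_succ]; ring
        rw [hktn, h5] at hf'
        omega)
    rw [h1] at hb
    rw [List.nil_append]
    rw [show ((0 : Int) + 1) = 1 from rfl]
    rw [hb]
    show _ = explore_tiles_alt position garden_map max_steps
    unfold explore_tiles_alt
    rw [if_neg (by omega), hv1]
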